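-- pv_equiv track=rewrite | github.com/Nnorto/EGE_code-main | Разное/векторное произведение повороты.py | count_left_turns
-- ===== SOURCE A (Python) =====
-- def count_left_turns(road):
--     left_turns = 0
--
--     for i in range(len(road) - 2):
--         x1, y1 = road[i]
--         x2, y2 = road[i+1]
--         x3, y3 = road[i+2]
--         cross_product = (x2 - x1) * (y3 - y2) - (y2 - y1) * (x3 - x2)
--
--         if cross_product > 0:
--             left_turns += 1
--
--     return left_turns
-- ===== SOURCE B (Python) =====
-- def count_left_turns(road):
--     edges = []
--     for (x1, y1), (x2, y2) in zip(road, road[1:]):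
--         edges.append((x2 - x1, y2 - y1))
--     return len([1 for (ax, ay), (bx, by) in zip(edges, edges[1:]) if ax * by - ay * bx > 0])
-- ===== Notes on version B (the rewrite author's own statement) =====
-- stated objective: alternative
-- what changed: B precomputes the list of consecutive edge vectors with zip and then counts adjacent edge pairs whose cross product is positive, replacing A's single index-based loop that reads three points per iteration.
import Mathlib
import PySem

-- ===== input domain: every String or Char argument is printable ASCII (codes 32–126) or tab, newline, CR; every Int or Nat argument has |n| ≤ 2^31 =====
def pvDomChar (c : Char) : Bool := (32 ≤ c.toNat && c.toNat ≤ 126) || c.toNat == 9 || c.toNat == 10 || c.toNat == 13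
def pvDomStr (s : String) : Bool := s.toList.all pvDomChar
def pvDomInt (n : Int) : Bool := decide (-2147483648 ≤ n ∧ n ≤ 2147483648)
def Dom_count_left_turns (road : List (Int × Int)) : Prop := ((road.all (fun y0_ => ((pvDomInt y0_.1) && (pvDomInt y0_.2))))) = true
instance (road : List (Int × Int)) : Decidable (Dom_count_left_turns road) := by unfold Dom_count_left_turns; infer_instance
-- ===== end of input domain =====

-- B first builds the list of consecutive edge vectors with zip, then counts positive cross
-- products of adjacent edges (two zip/filter passes) instead of A's single index-based scan
-- reading three points per step; objective: alternative (same cost, different decomposition).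

-- ===== PORT A =====
def count_left_turns (road : List (Int × Int)) : Int :=
  (PySem.List.pyRange 0 ((road.length : Int) - 2) 1).foldl
    (fun left_turns i =>
      let p1 := PySem.List.pyGetD road i (0, 0)
      let p2 := PySem.List.pyGetD road (i + 1) (0, 0)
      let p3 := PySem.List.pyGetD road (i + 2) (0, 0)
      let cross_product := (p2.1 - p1.1) * (p3.2 - p2.2) - (p2.2 - p1.2) * (p3.1 - p2.1)
      if cross_product > 0 then left_turns + 1 else left_turns) 0

-- ===== PORT B =====
def count_left_turns_alt (road : List (Int × Int)) : Int :=
  let edges := (road.zip (PySem.List.slice road (some 1) none)).map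
    (fun pq => (pq.2.1 - pq.1.1, pq.2.2 - pq.1.2))
  (((edges.zip (PySem.List.slice edges (some 1) none)).filter
    (fun ee => decide (ee.1.1 * ee.2.2 - ee.1.2 * ee.2.1 > 0))).length : Int)

-- ===== PRECONDITION & SPEC =====
def Spec_count_left_turns (road : List (Int × Int)) (out : Int) : Prop := out = count_left_turns_alt road
instance (road : List (Int × Int)) (out : Int) : Decidable (Spec_count_left_turns road out) := by unfold Spec_count_left_turns; infer_instance

-- ===== CLAIM (what is proved, stated in full; the proofs are below) =====
def Claim_equal_count_left_turns : Prop := ∀ (road : List (Int × Int)), Dom_count_left_turns road → Spec_count_left_turns road (count_left_turns road)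

-- ===== LEMMAS AND PROOFS =====

-- common recursive reference: one cross-product test per window of three points
def triCross : List (Int × Int) → Int
  | p1 :: p2 :: p3 :: rest =>
      (if (p2.1 - p1.1) * (p3.2 - p2.2) - (p2.2 - p1.2) * (p3.1 - p2.1) > 0 then 1 else 0)
        + triCross (p2 :: p3 :: rest)
  | _ => 0

-- A's loop-body test at Nat index k, with Python's indexing resolved to getD
def triPred (xs : List (Int × Int)) (k : Nat) : Bool :=
  let p1 := xs.getD k (0, 0)
  let p2 := xs.getD (k + 1) (0, 0)
  let p3 := xs.getD (k + 2) (0, 0)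
  decide ((p2.1 - p1.1) * (p3.2 - p2.2) - (p2.2 - p1.2) * (p3.1 - p2.1) > 0)

theorem range_count_eq_triCross (xs : List (Int × Int)) :
    (((List.range (xs.length - 2)).countP (triPred xs) : Nat) : Int) = triCross xs := by
  induction xs with
  | nil => simp [triCross]
  | cons a t ih =>
    match t with
    | [] => simp [triCross]
    | [b] => simp [triCross]
    | b :: c :: rest =>
      have hlen : (a :: b :: c :: rest).length - 2 = (b :: c :: rest).length - 2 + 1 := by
        simp [List.length_cons]
      rw [hlen, List.range_succ_eq_map, List.countP_cons, List.countP_map]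
      have hpred : (triPred (a :: b :: c :: rest)) ∘ Nat.succ = triPred (b :: c :: rest) := by
        funext k; simp [triPred]
      have h0 : triPred (a :: b :: c :: rest) 0 =
          decide ((b.1 - a.1) * (c.2 - b.2) - (b.2 - a.2) * (c.1 - b.1) > 0) := by
        simp [triPred]
      rw [hpred, h0, triCross, ← ih]
      simp only [decide_eq_true_eq]
      by_cases h : (b.1 - a.1) * (c.2 - b.2) - (b.2 - a.2) * (c.1 - b.1) > 0
      · rw [if_pos h, if_pos h]; push_cast; ring
      · rw [if_neg h, if_neg h]; push_cast; ring

theorem A_eq (xs : List (Int × Int)) :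
    count_left_turns xs = (((List.range (xs.length - 2)).countP (triPred xs) : Nat) : Int) := by
  unfold count_left_turns
  rw [PySem.List.foldl_ite_add_one]
  rw [PySem.List.pyRange_one, List.countP_map]
  have hn : (((xs.length : Int) - 2 - 0).toNat) = xs.length - 2 := by omega
  rw [hn, zero_add]
  congr 2
  funext k
  simp only [Function.comp, zero_add]
  rw [show ((k : Int) + 1) = ((k + 1 : Nat) : Int) by push_cast; ring,
      show ((k : Int) + 2) = ((k + 2 : Nat) : Int) by push_cast; ring]
  simp only [PySem.List.pyGetD_natCast]
  simp [triPred]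

theorem B_eq (xs : List (Int × Int)) : count_left_turns_alt xs = triCross xs := by
  induction xs with
  | nil => rfl
  | cons a t ih =>
    match t with
    | [] => rfl
    | [b] => rfl
    | b :: c :: rest =>
      simp only [count_left_turns_alt, PySem.List.slice_from_one, List.tail_cons,
        List.zip_cons_cons, List.map_cons] at ih ⊢
      rw [triCross, ← ih, List.filter_cons]
      simp only [decide_eq_true_eq]
      by_cases h : (b.1 - a.1) * (c.2 - b.2) - (b.2 - a.2) * (c.1 - b.1) > 0
      · rw [if_pos h, if_pos h, List.length_cons]; push_cast; ring
      · rw [if_neg h, if_neg h]; ring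

-- ===== VERDICT (by name: the statement is the Claim_ definition above) =====
theorem count_left_turns_spec : Claim_equal_count_left_turns := by
  intro road _
  unfold Spec_count_left_turns
  rw [A_eq, B_eq, range_count_eq_triCross]
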